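-- pv_equiv track=rewrite | github.com/ComDePri/CFGpy | CFGpy/meaning/MeaningBuilder.py | count_shapes_in_many_communities
-- ===== SOURCE A (Python) =====
-- from collections import Counter
--
-- def count_shapes_in_many_communities(communities):
--     counters = []
--     all_shapes = []
--     for community in communities:
--         unraveled_community = [
--             int(shape) for shapes in community for shape in shapes
--         ]
--         shape_counter = Counter(unraveled_community)
--         all_shapes += list(shape_counter.keys())
--         counters.append(shape_counter)
--
--     all_shapes = set(all_shapes)
--
--     return {
--         shape: [counter[shape] for counter in counters] for shape in all_shapes
--     }
-- ===== SOURCE B (Python) =====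
-- def count_shapes_in_many_communities(communities):
--     # Single streaming pass: no Counter objects and no global shape set.
--     # The dense count matrix is filled in place, column by community index:
--     # each shape occurrence increments its row's cell for the current community.
--     C = len(communities)
--     result = {}
--     for i, community in enumerate(communities):
--         for shapes in community:
--             for shape in shapes:
--                 row = result.setdefault(int(shape), [0] * C)
--                 row[i] += 1
--     return result
-- ===== Notes on version B (the rewrite author's own statement) =====
-- stated objective: simpler
-- what changed: B replaces the collect-Counters-then-assemble-per-shape strategy by a single streaming pass that preallocates a zero row per new shape and increments its cell for the current community index on every occurrence, so no Counter objects, no per-shape assembly loop and no global shape set are built.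
import Mathlib
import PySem

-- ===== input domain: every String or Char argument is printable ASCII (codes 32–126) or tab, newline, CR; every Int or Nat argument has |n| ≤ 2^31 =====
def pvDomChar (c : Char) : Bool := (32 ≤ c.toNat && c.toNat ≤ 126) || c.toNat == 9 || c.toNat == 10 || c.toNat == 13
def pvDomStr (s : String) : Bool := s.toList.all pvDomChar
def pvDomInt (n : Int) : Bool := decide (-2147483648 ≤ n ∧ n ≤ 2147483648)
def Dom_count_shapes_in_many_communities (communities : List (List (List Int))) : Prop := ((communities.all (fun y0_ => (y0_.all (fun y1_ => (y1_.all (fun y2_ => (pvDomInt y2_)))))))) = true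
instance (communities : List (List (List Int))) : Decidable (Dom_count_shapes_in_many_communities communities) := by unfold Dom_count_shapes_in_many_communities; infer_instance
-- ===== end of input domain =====

-- B replaces A's Counter-per-community pass plus per-shape assembly by one streaming
-- pass that fills the dense count matrix cell by cell (objective: simpler).

-- ===== PORT A =====
-- 'int(shape)' on an int is the identity, so the unravelling comprehension is a
-- flatMap of identity maps.
def count_shapes_in_many_communities (communities : List (List (List Int))) : List (Int × List Int) :=
  let st := communities.foldl
    (fun (acc : List (PySem.Dict Int Int) × List Int) community =>
      let unraveled_community := community.flatMap (fun shapes => shapes.map (fun shape => shape))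
      let shape_counter := PySem.Dict.counter unraveled_community
      (acc.1 ++ [shape_counter], acc.2 ++ shape_counter.keys))
    ([], [])
  let all_shapes := PySem.Set.ofList st.2
  all_shapes.map (fun shape => (shape, st.1.map (fun counter => counter.getD shape 0)))

-- ===== PORT B =====
-- setdefault + in-place 'row[i] += 1' is modelled by getD with the default row
-- followed by insert (overwrite in place keeps Python's dict key order);
-- '[0] * C' is PySem.List.pyRepeat, 'row[i]' is pyGetD/pySetD.
def count_shapes_in_many_communities_alt (communities : List (List (List Int))) : List (Int × List Int) :=
  let C : Int := (communities.length : Int)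
  ((PySem.List.enumerate communities 0).foldl
    (fun (result : PySem.Dict Int (List Int)) ic =>
      ic.2.foldl
        (fun result shapes =>
          shapes.foldl
            (fun result shape =>
              let row := result.getD shape (PySem.List.pyRepeat [0] C)
              result.insert shape
                (PySem.List.pySetD row ic.1 (PySem.List.pyGetD row ic.1 0 + 1)))
            result)
        result)
    PySem.Dict.empty).items

-- ===== PRECONDITION & SPEC =====
def Spec_count_shapes_in_many_communities (communities : List (List (List Int))) (out : List (Int × List Int)) : Prop := out = count_shapes_in_many_communities_alt communities
instance (communities : List (List (List Int))) (out : List (Int × List Int)) : Decidable (Spec_count_shapes_in_many_communities communities out) := by unfold Spec_count_shapes_in_many_communities; infer_instance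

-- ===== CLAIM (what is proved, stated in full; the proofs are below) =====
def Claim_equal_count_shapes_in_many_communities : Prop := ∀ (communities : List (List (List Int))), Dom_count_shapes_in_many_communities communities → Spec_count_shapes_in_many_communities communities (count_shapes_in_many_communities communities)

-- ===== LEMMAS AND PROOFS =====

def pvBump (i : Nat) (n : Int) (v : List Int) : List Int := v.set i (v.getD i 0 + n)

theorem pvBump_zero (i : Nat) (v : List Int) : pvBump i 0 v = v := by
  unfold pvBump
  by_cases h : i < v.length
  · simp [List.getD, List.getElem?_eq_getElem h]
  · simp [List.set_eq_of_length_le (Nat.le_of_not_lt h)]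

theorem pvBump_bump (i : Nat) (m n : Int) (v : List Int) :
    pvBump i m (pvBump i n v) = pvBump i (n + m) v := by
  unfold pvBump
  by_cases h : i < v.length
  · simp [List.getD, h, List.set_set, add_assoc]
  · simp [List.set_eq_of_length_le (Nat.le_of_not_lt h)]

def pvRow (C : Nat) (done : List (List Int)) (s : Int) : List Int :=
  done.map (fun p => ((List.count s p : Nat) : Int)) ++ List.replicate (C - done.length) 0

theorem pvBump_row (C : Nat) (done : List (List Int)) (f : List Int) (s : Int)
    (h : done.length < C) :
    pvBump done.length ((List.count s f : Nat) : Int) (pvRow C done s) = pvRow C (done ++ [f]) s := by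
  unfold pvBump pvRow
  set M := done.map (fun p => ((List.count s p : Nat) : Int)) with hM
  have hl : M.length = done.length := by simp [hM]
  have hrep : List.replicate (C - done.length) (0:Int) = 0 :: List.replicate (C - done.length - 1) 0 := by
    rw [show C - done.length = (C - done.length - 1) + 1 by omega]
    simp [List.replicate_succ]
  rw [hrep]
  have hg : (M ++ 0 :: List.replicate (C - done.length - 1) 0).getD done.length 0 = 0 := by
    simp [List.getD, hl]
  rw [hg, List.set_append_right _ _ (by omega : M.length ≤ done.length)]
  rw [hl, Nat.sub_self]
  simp [List.set_cons_zero, hM]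
  rw [show C - done.length - 1 = C - (done.length + 1) by omega]

theorem pvRow_notmem (C : Nat) (done : List (List Int)) (s : Int)
    (hle : done.length ≤ C) (h : s ∉ done.flatten) :
    pvRow C done s = List.replicate C 0 := by
  unfold pvRow
  have : done.map (fun p => ((List.count s p : Nat) : Int)) = List.replicate done.length 0 := by
    rw [List.eq_replicate_iff]
    refine ⟨by simp, ?_⟩
    intro x hx
    rcases List.mem_map.1 hx with ⟨p, hp, rfl⟩
    have : List.count s p = 0 := List.count_eq_zero.2 (fun hm => h (List.mem_flatten.2 ⟨p, hp, hm⟩))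
    simp [this]
  rw [this, ← List.replicate_add, Nat.add_sub_cancel' hle]

def pvDedupF : List Int → List Int → List Int
  | _, [] => []
  | K, x :: xs => if x ∈ K then pvDedupF K xs else x :: pvDedupF (K ++ [x]) xs

theorem pvMem_dedupF (x : Int) (xs : List Int) : ∀ K, x ∈ pvDedupF K xs ↔ (x ∈ xs ∧ x ∉ K) := by
  induction xs with
  | nil => intro K; simp [pvDedupF]
  | cons y ys ih =>
    intro K
    by_cases hy : y ∈ K
    · rw [pvDedupF, if_pos hy, ih]
      constructor
      · rintro ⟨h1, h2⟩; exact ⟨List.mem_cons_of_mem _ h1, h2⟩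
      · rintro ⟨h1, h2⟩
        rcases List.mem_cons.1 h1 with rfl | h1
        · exact absurd hy h2
        · exact ⟨h1, h2⟩
    · rw [pvDedupF, if_neg hy]
      constructor
      · intro h
        rcases List.mem_cons.1 h with rfl | h
        · exact ⟨List.mem_cons_self, hy⟩
        · rw [ih] at h
          refine ⟨List.mem_cons_of_mem _ h.1, fun hK => h.2 (by simp [hK])⟩
      · rintro ⟨h1, h2⟩
        rcases List.mem_cons.1 h1 with rfl | h1
        · exact List.mem_cons_self
        · by_cases hxy : x = y
          · subst hxy; exact List.mem_cons_self
          · exact List.mem_cons_of_mem _ ((ih _).2 ⟨h1, by simp [h2, hxy]⟩)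

-- the streaming step of port B, after the PySem index primitives are unfolded:
-- fetch (or default) the row, bump cell i by one, store it back
theorem pvInner (C i : Nat) (f : List Int) : ∀ d : PySem.Dict Int (List Int), d.keys.Nodup →
    (f.foldl (fun d s => d.insert s (pvBump i 1 (d.getD s (List.replicate C 0)))) d).items
      = d.items.map (fun p => (p.1, pvBump i ((List.count p.1 f : Nat) : Int) p.2))
        ++ (pvDedupF d.keys f).map (fun s => (s, pvBump i ((List.count s f : Nat) : Int) (List.replicate C 0))) := by
  induction f with
  | nil =>
    intro d _
    simp [pvDedupF, pvBump_zero]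
  | cons s f ih =>
    intro d hnd
    rw [List.foldl_cons]
    by_cases hs : d.contains s = true
    · have hmem : s ∈ d.keys := (PySem.Dict.contains_iff_mem_keys d s).1 hs
      have hkeys : (d.insert s (pvBump i 1 (d.getD s (List.replicate C 0)))).keys = d.keys :=
        PySem.Dict.keys_insert_of_contains _ _ hs
      have hnd' : (d.insert s (pvBump i 1 (d.getD s (List.replicate C 0)))).keys.Nodup := by
        rw [hkeys]; exact hnd
      rw [ih _ hnd', PySem.Dict.items_insert_of_contains _ _ hs, hkeys]
      rw [show pvDedupF d.keys (s :: f) = pvDedupF d.keys f from by rw [pvDedupF, if_pos hmem]]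
      congr 1
      · rw [List.map_map]
        refine List.map_congr_left ?_
        intro p hp
        by_cases hps : p.1 = s
        · have hval : p.2 = d.getD s (List.replicate C 0) := by
            have : (p.1, p.2) ∈ d.items := by simpa using hp
            rw [hps] at this
            exact (PySem.Dict.getD_of_mem_items _ this hnd _).symm
          simp only [Function.comp, hps, beq_self_eq_true, if_pos]
          simp only [← hval]
          rw [pvBump_bump, List.count_cons_self]
          congr 1
          push_cast
          ring
        · simp only [Function.comp]
          rw [if_neg (by simpa using hps)]
          rw [List.count_cons_of_ne (fun h => hps h.symm)]
      · refine List.map_congr_left ?_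
        intro x hx
        have hxs : x ≠ s := by
          intro h
          exact ((pvMem_dedupF x f d.keys).1 hx).2 (h ▸ hmem)
        rw [List.count_cons_of_ne (Ne.symm hxs)]
    · have hns : s ∉ d.keys := fun h => hs ((PySem.Dict.contains_iff_mem_keys d s).2 h)
      have hitems : (d.insert s (pvBump i 1 (d.getD s (List.replicate C 0)))).items
          = d.items ++ [(s, pvBump i 1 (d.getD s (List.replicate C 0)))] :=
        PySem.Dict.items_insert_of_not_contains _ _ (by simpa using hs)
      have hgd : d.getD s (List.replicate C 0) = List.replicate C 0 :=
        PySem.Dict.getD_of_not_contains _ _ (by simpa using hs)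
      have hkeys : (d.insert s (pvBump i 1 (d.getD s (List.replicate C 0)))).keys = d.keys ++ [s] :=
        PySem.Dict.keys_insert_of_not_contains _ _ (by simpa using hs)
      have hnd' : (d.insert s (pvBump i 1 (d.getD s (List.replicate C 0)))).keys.Nodup := by
        rw [hkeys]
        refine List.Nodup.append hnd (List.nodup_singleton s) ?_
        intro a ha hb
        simp only [List.mem_singleton] at hb
        subst hb
        exact hns ha
      rw [ih _ hnd', hitems, hkeys]
      rw [List.map_append, List.append_assoc]
      congr 1
      · refine List.map_congr_left ?_
        intro p hp
        have hpk : p.1 ∈ d.keys := PySem.Dict.mem_keys_of_mem_items _ hp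
        have hps : p.1 ≠ s := fun h => hns (h ▸ hpk)
        rw [List.count_cons_of_ne (Ne.symm hps)]
      · rw [pvDedupF, if_neg hns]
        simp only [List.map_cons, List.map_nil, List.nil_append, List.cons_append]
        congr 1
        · rw [hgd, pvBump_bump, List.count_cons_self]
          congr 1
          push_cast
          ring
        · refine List.map_congr_left ?_
          intro x hx
          have hxs : x ≠ s := by
            have := ((pvMem_dedupF x f (d.keys ++ [s])).1 hx).2
            intro h; exact this (by simp [h])
          rw [List.count_cons_of_ne (Ne.symm hxs)]

theorem pvDedupF_append (l1 l2 K : List Int) :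
    pvDedupF K (l1 ++ l2) = pvDedupF K l1 ++ pvDedupF (K ++ pvDedupF K l1) l2 := by
  induction l1 generalizing K with
  | nil => simp [pvDedupF]
  | cons x l1 ih =>
    by_cases hx : x ∈ K
    · simp [pvDedupF, hx, ih]
    · simp [pvDedupF, hx, ih, List.append_assoc]

theorem pvNodup_dedupF (xs : List Int) : ∀ K, (pvDedupF K xs).Nodup := by
  induction xs with
  | nil => intro K; simp [pvDedupF]
  | cons y ys ih =>
    intro K
    by_cases hy : y ∈ K
    · simpa [pvDedupF, hy] using ih K
    · rw [pvDedupF, if_neg hy]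
      refine List.nodup_cons.2 ⟨fun h => ?_, ih _⟩
      exact ((pvMem_dedupF _ _ _).1 h).2 (by simp)

-- one outer step of port B (community c at index j), with the PySem primitives unfolded
theorem pvOuter (C : Nat) (cs : List (List (List Int))) : ∀ (done : List (List Int)) (d : PySem.Dict Int (List Int)),
    done.length + cs.length = C →
    d.keys.Nodup →
    d.keys = pvDedupF [] done.flatten →
    d.items = (pvDedupF [] done.flatten).map (fun s => (s, pvRow C done s)) →
    ((PySem.List.enumerate cs ((done.length : Nat) : Int)).foldl
      (fun (result : PySem.Dict Int (List Int)) ic =>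
        ic.2.foldl
          (fun result shapes =>
            shapes.foldl
              (fun result shape =>
                result.insert shape
                  (PySem.List.pySetD (result.getD shape (PySem.List.pyRepeat [0] ((C : Nat) : Int))) ic.1
                    (PySem.List.pyGetD (result.getD shape (PySem.List.pyRepeat [0] ((C : Nat) : Int))) ic.1 0 + 1)))
              result)
          result)
      d).items
      = (pvDedupF [] (done ++ cs.map List.flatten).flatten).map
          (fun s => (s, pvRow C (done ++ cs.map List.flatten) s)) := by
  induction cs with
  | nil =>
    intro done d _ _ _ hitems
    simpa [PySem.List.enumerate] using hitems
  | cons c cs ih =>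
    intro done d hC hnd hkeys hitems
    rw [PySem.List.enumerate_cons, List.foldl_cons]
    have hstep :
        (c.foldl
          (fun result shapes =>
            shapes.foldl
              (fun result shape =>
                result.insert shape
                  (PySem.List.pySetD (result.getD shape (PySem.List.pyRepeat [0] ((C : Nat) : Int))) ((done.length : Nat) : Int)
                    (PySem.List.pyGetD (result.getD shape (PySem.List.pyRepeat [0] ((C : Nat) : Int))) ((done.length : Nat) : Int) 0 + 1)))
              result)
          d)
        = (c.flatten.foldl
            (fun d s => d.insert s (pvBump done.length 1 (d.getD s (List.replicate C 0)))) d) := by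
      rw [← List.foldl_flatten]
      congr 1
      funext r x
      simp [PySem.List.pySetD_natCast, PySem.List.pyGetD_natCast, PySem.List.pyRepeat_singleton, pvBump]
    have hlt : done.length < C := by simp at hC; omega
    have hle : done.length ≤ C := Nat.le_of_lt hlt
    have hIn := pvInner C done.length c.flatten d hnd
    have hdecomp :
        (c.flatten.foldl
          (fun d s => d.insert s (pvBump done.length 1 (d.getD s (List.replicate C 0)))) d).items
        = (pvDedupF [] (done.flatten ++ c.flatten)).map
            (fun s => (s, pvRow C (done ++ [c.flatten]) s)) := by
      rw [hIn, hitems, hkeys, List.map_map]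
      rw [pvDedupF_append, List.map_append, List.nil_append]
      congr 1
      · refine List.map_congr_left ?_
        intro s _
        simp only [Function.comp]
        rw [pvBump_row C done c.flatten s hlt]
      · refine List.map_congr_left ?_
        intro s hsm
        have hnm : s ∉ done.flatten := by
          have h2 := ((pvMem_dedupF s c.flatten _).1 hsm).2
          intro hmem
          exact h2 ((pvMem_dedupF s done.flatten []).2 ⟨hmem, by simp⟩)
        rw [show List.replicate C (0:Int) = pvRow C done s from (pvRow_notmem C done s hle hnm).symm]
        rw [pvBump_row C done c.flatten s hlt]
    have hkeys1 :
        (c.flatten.foldl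
          (fun d s => d.insert s (pvBump done.length 1 (d.getD s (List.replicate C 0)))) d).keys
        = pvDedupF [] (done.flatten ++ c.flatten) := by
      simp only [PySem.Dict.keys, hdecomp, List.map_map]
      exact List.map_id _
    have hnd1 :
        (c.flatten.foldl
          (fun d s => d.insert s (pvBump done.length 1 (d.getD s (List.replicate C 0)))) d).keys.Nodup := by
      rw [hkeys1]; exact pvNodup_dedupF _ _
    rw [hstep]
    have hcast : ((done.length : Nat) : Int) + 1 = (((done ++ [c.flatten]).length : Nat) : Int) := by
      simp [List.length_append]
    rw [hcast]
    rw [ih (done ++ [c.flatten]) _ (by simp at hC ⊢; omega) hnd1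
        (by rw [hkeys1]; simp)
        (by rw [hdecomp]; simp)]
    simp [List.append_assoc]



def pvCanon (communities : List (List (List Int))) : List (Int × List Int) :=
  (pvDedupF [] (communities.map List.flatten).flatten).map
    (fun s => (s, (communities.map List.flatten).map (fun p => ((List.count s p : Nat) : Int))))

theorem pvFoldAdd (xs K : List Int) :
    xs.foldl PySem.Set.add K = K ++ pvDedupF K xs := by
  induction xs generalizing K with
  | nil => simp [pvDedupF]
  | cons x xs ih =>
    by_cases hx : x ∈ K
    · simp [pvDedupF, hx, PySem.Set.add, PySem.Set.contains, ih]
    · simp [pvDedupF, hx, PySem.Set.add, PySem.Set.contains, ih]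

theorem pvOfList_eq (xs : List Int) : PySem.Set.ofList xs = pvDedupF [] xs := by
  rw [PySem.Set.ofList_eq_foldl, pvFoldAdd]; simp

theorem pvDedupF_idem (ys : List Int) : ∀ K J : List Int, (∀ x ∈ J, x ∈ K) →
    pvDedupF K (pvDedupF J ys) = pvDedupF K ys := by
  induction ys with
  | nil => intro K J _; simp [pvDedupF]
  | cons y ys ih =>
    intro K J hJK
    by_cases hyJ : y ∈ J
    · simp [pvDedupF, hyJ, ih K J hJK, hJK y hyJ]
    · by_cases hyK : y ∈ K
      · have : ∀ x ∈ J ++ [y], x ∈ K := by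
          intro x hx; rcases List.mem_append.1 hx with h | h
          · exact hJK x h
          · simp at h; simpa [h] using hyK
        simp [pvDedupF, hyJ, hyK, ih K (J ++ [y]) this]
      · have : ∀ x ∈ J ++ [y], x ∈ K ++ [y] := by
          intro x hx; rcases List.mem_append.1 hx with h | h
          · exact List.mem_append.2 (Or.inl (hJK x h))
          · exact List.mem_append.2 (Or.inr h)
        simp [pvDedupF, hyJ, hyK, ih (K ++ [y]) (J ++ [y]) this]

theorem pvDedupF_flatMap (ps : List (List Int)) : ∀ K : List Int,
    pvDedupF K (ps.flatMap (fun p => pvDedupF [] p)) = pvDedupF K ps.flatten := by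
  induction ps with
  | nil => intro K; simp
  | cons p ps ih =>
    intro K
    have hnil : ∀ x ∈ ([] : List Int), x ∈ K := by simp
    rw [List.flatMap_cons, List.flatten_cons, pvDedupF_append, pvDedupF_append,
        pvDedupF_idem p K [] hnil, ih]

theorem pvA_canon (communities : List (List (List Int))) :
    count_shapes_in_many_communities communities = pvCanon communities := by
  unfold count_shapes_in_many_communities pvCanon
  simp only []
  rw [PySem.List.foldl_prod_mk
        (f := fun (acc : List (PySem.Dict Int Int)) (community : List (List Int)) =>
          acc ++ [PySem.Dict.counter (community.flatMap (fun shapes => shapes.map (fun shape => shape)))])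
        (g := fun (acc : List Int) (community : List (List Int)) =>
          acc ++ (PySem.Dict.counter (community.flatMap (fun shapes => shapes.map (fun shape => shape)))).keys)]
  rw [PySem.List.foldl_append_singleton_eq_map, PySem.List.foldl_append_eq_flatMap]
  simp only [PySem.Dict.keys_counter, pvOfList_eq, List.map_map, List.nil_append,
    Function.comp_def]
  have hfl : ∀ c : List (List Int), c.flatMap (fun shapes => shapes.map (fun shape => shape)) = c.flatten :=
    fun c => by simp
  simp only [hfl, PySem.Dict.getD_counter]
  rw [← pvDedupF_flatMap (communities.map List.flatten) []]
  simp [List.flatMap_map]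

theorem pvB_canon (communities : List (List (List Int))) :
    count_shapes_in_many_communities_alt communities = pvCanon communities := by
  unfold count_shapes_in_many_communities_alt pvCanon
  simp only []
  have h := pvOuter communities.length communities [] PySem.Dict.empty
    (by simp)
    (by simp [PySem.Dict.keys, PySem.Dict.empty])
    (by simp [PySem.Dict.keys, PySem.Dict.empty, pvDedupF])
    (by simp [PySem.Dict.empty, pvDedupF])
  simp only [List.length_nil, Nat.cast_zero, List.nil_append, pvRow] at h
  rw [h]
  refine List.map_congr_left ?_
  intro s _
  simp

-- ===== VERDICT (by name: the statement is the Claim_ definition above) =====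
theorem count_shapes_in_many_communities_spec : Claim_equal_count_shapes_in_many_communities := by
  intro communities _
  unfold Spec_count_shapes_in_many_communities
  rw [pvA_canon, pvB_canon]
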